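-- pv_equiv track=rewrite | github.com/kna163/partitions | src/partitions/parti.py | from_decomp
-- ===== SOURCE A (Python) =====
-- Seq = list[int]
--
-- def trim_seq(seq : Seq) -> Seq:
--     i = 0
--     j = len(seq)
--     while i < len(seq) and seq[i] == 0:
--         i += 1
--     while j > 0 and seq[j-1] == 1:
--         j -= 1
--     return seq[i:j]
--
-- def ref_idx(seq : Seq) -> int:
--     zs = seq.count(0)
--     c = 0
--     for i,b in enumerate(seq):
--         if zs == c:
--             return i
--         if b == 0:
--             zs -= 1
--         else:
--             c += 1
--     return 0
--
-- def core_to_vec(seq : Seq, t : int) -> list[int]: #seq is the seq of a core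
--     """6
--         [1, 0, 1, 1, 0, 0,
--          1, 1, 1, 0, 0, 1,
--     |||| 1, 0, 0, 1, 0, 1,
--          0, 1, 1, 1, 1, 1,
--          1, 0, 1, 1, 0, 1,
--          0]"""
--     temp = [-1] * t
--     ref = ref_idx(seq)
--     for i in range(t):
--         j = 0
--         idx = (i - ref) % t
--         while j*t+i < len(seq):
--             if seq[j*t+i] == 1:
--                 break
--             j += 1
--         temp[idx] = (j*t+i-ref)//t
--     return temp
--
-- def from_decomp(seq : Seq, quos : list[Seq]) -> Seq: #seq is a len(quos)-core
--     t = len(quos)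
--     vec = core_to_vec(seq,t)
--     refs = [ref_idx(q) for q in quos]
--     mi = (vec[0]-refs[0]) * t
--     ma = (vec[0]+len(quos[0]) - refs[0]) * t
--     for i in range(1,t):
--         neg = (vec[i]-refs[i]) * t + i
--         pos = (len(quos[i]) - refs[i] + vec[i]) * t + i
--         if neg < mi:
--             mi = neg
--         if pos > ma:
--             ma = pos
--     ans = [-1] * (ma-mi+1)
--     for i in range(mi,ma+1):
--         # i = k * t + i2
--         # s_i = (s^(i2))_(k-n_i2)
--         # seq[j] = s_(j-ref)
--         k = i//t
--         i2 = (i % t + t) % t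
--         rel = k-vec[i2] # want s^(i2)_(k-n_i) "=" quos[i2][ref_i + k-n_i]
--         r = refs[i2]
--         l = len(quos[i2])
--         if r+k-vec[i2] < 0:
--             ans[i-mi] = 0
--         elif r+k-vec[i2] >= l :
--             ans[i-mi] = 1
--         else:
--             ans[i-mi] = quos[i2][r + k-vec[i2]]
--     return trim_seq(ans)
-- ===== SOURCE B (Python) =====
-- # B: per-residue padded columns (0s ++ quotient ++ 1s) built once, then one
-- # branch-free gather pass; min/max builtins replace A's running-extrema loop.
-- Seq = list[int]
--
-- def trim_seq(seq: Seq) -> Seq: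
--     i = 0
--     j = len(seq)
--     while i < len(seq) and seq[i] == 0:
--         i += 1
--     while j > 0 and seq[j-1] == 1:
--         j -= 1
--     return seq[i:j]
--
-- def ref_idx(seq: Seq) -> int:
--     zs = seq.count(0)
--     c = 0
--     for i, b in enumerate(seq):
--         if zs == c:
--             return i
--         if b == 0:
--             zs -= 1
--         else:
--             c += 1
--     return 0
--
-- def core_to_vec(seq: Seq, t: int) -> list[int]:
--     temp = [-1] * t
--     ref = ref_idx(seq)
--     for i in range(t):
--         j = 0
--         idx = (i - ref) % t
--         while j*t+i < len(seq):
--             if seq[j*t+i] == 1: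
--                 break
--             j += 1
--         temp[idx] = (j*t+i-ref)//t
--     return temp
--
-- def from_decomp(seq: Seq, quos: list[Seq]) -> Seq:
--     t = len(quos)
--     vec = core_to_vec(seq, t)
--     refs = [ref_idx(q) for q in quos]
--     mi = min((vec[i] - refs[i]) * t + i for i in range(t))
--     ma = max((len(quos[i]) - refs[i] + vec[i]) * t + i for i in range(t))
--     k0 = mi // t
--     k1 = ma // t
--     cols = [[0] * (vec[i] - refs[i] - k0) + quos[i]
--             + [1] * (k1 - (vec[i] - refs[i] + len(quos[i])) + 1) for i in range(t)]
--     ans = [cols[i % t][i // t - k0] for i in range(mi, ma + 1)]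
--     return trim_seq(ans)
-- ===== Notes on version B (the rewrite author's own statement) =====
-- stated objective: alternative
-- what changed: Instead of a flat loop over every output index with a three-way clamp branch per position, B precomputes one padded column per residue class (zeros ++ quotient ++ ones, sized from the global k-range) and fills the output with a single branch-free gather, computing the bounds with min/max builtins instead of a running-extrema loop.
-- outside the precondition, e.g. on from_decomp([1, 0], []): A raises IndexError, B raises ValueError
import Mathlib
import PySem

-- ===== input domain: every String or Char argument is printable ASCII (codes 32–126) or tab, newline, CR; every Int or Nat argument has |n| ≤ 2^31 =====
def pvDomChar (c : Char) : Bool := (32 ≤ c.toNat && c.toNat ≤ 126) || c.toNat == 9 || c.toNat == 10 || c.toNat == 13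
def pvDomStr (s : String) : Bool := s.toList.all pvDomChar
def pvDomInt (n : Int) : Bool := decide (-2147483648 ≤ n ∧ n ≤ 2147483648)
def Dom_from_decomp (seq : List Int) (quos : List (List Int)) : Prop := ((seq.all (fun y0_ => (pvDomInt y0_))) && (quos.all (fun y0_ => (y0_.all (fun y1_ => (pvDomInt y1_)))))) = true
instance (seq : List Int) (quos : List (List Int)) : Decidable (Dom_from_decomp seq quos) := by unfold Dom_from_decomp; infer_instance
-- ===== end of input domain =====

-- B replaces A's flat gather loop (per-index decode + three-way clamp branch) by
-- per-residue padded columns (zeros ++ quotient ++ ones) and one branch-free gather,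
-- with min/max builtins for the bounds; same cost, different decomposition.

-- ===== PORT A =====
-- shared module helpers (trim_seq, ref_idx, core_to_vec), used verbatim by both ports

def trimI (s : List Int) (i : Nat) : Nat :=
  if _h : i < s.length then
    if s.getD i 0 = 0 then trimI s (i + 1) else i
  else i
termination_by s.length - i

def trimJ (s : List Int) : Nat → Nat
  | 0 => 0
  | j + 1 => if s.getD j 0 = 1 then trimJ s j else j + 1

def trimSeq (s : List Int) : List Int :=
  PySem.List.slice s (some ((trimI s 0 : Nat) : Int)) (some ((trimJ s s.length : Nat) : Int))

def refIdxGo : List Int → Int → Int → Int → Int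
  | [], _, _, _ => 0
  | b :: rest, i, zs, c =>
    if zs = c then i
    else if b = 0 then refIdxGo rest (i + 1) (zs - 1) c
    else refIdxGo rest (i + 1) zs (c + 1)

def refIdx (s : List Int) : Int := refIdxGo s 0 ((PySem.List.count s 0 : Nat) : Int) 0

-- inner while of core_to_vec; the t = 0 branch is unreachable in use (Python loops forever there)
def findJ (s : List Int) (t i j : Nat) : Nat :=
  if _hlt : j * t + i < s.length then
    if s.getD (j * t + i) 0 = 1 then j
    else if _ht : t = 0 then j
    else findJ s t i (j + 1)
  else j
termination_by s.length - (j * t + i)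
decreasing_by
  have h1 : (j + 1) * t = j * t + t := by ring
  omega

def coreToVec (s : List Int) (t : Nat) : List Int :=
  let ref := refIdx s
  (PySem.List.pyRange 0 t 1).foldl (fun temp i =>
    let j := findJ s t i.toNat 0
    let idx := PySem.Int.mod (i - ref) t
    temp.set idx.toNat (PySem.Int.floordiv ((j : Int) * t + i - ref) t))
    (List.replicate t (-1))

def from_decomp (seq : List Int) (quos : List (List Int)) : List Int :=
  let t := quos.length
  let vec := coreToVec seq t
  let refs := quos.map refIdx
  let mi0 := (vec.getD 0 0 - refs.getD 0 0) * t
  let ma0 := (vec.getD 0 0 + ((quos.getD 0 []).length : Int) - refs.getD 0 0) * t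
  let mm := (PySem.List.pyRange 1 t 1).foldl (fun (p : Int × Int) i =>
      (if (vec.getD i.toNat 0 - refs.getD i.toNat 0) * t + i < p.1
         then (vec.getD i.toNat 0 - refs.getD i.toNat 0) * t + i else p.1,
       if p.2 < (((quos.getD i.toNat []).length : Int) - refs.getD i.toNat 0 + vec.getD i.toNat 0) * t + i
         then (((quos.getD i.toNat []).length : Int) - refs.getD i.toNat 0 + vec.getD i.toNat 0) * t + i else p.2))
    (mi0, ma0)
  let mi := mm.1
  let ma := mm.2
  let ans := (PySem.List.pyRange mi (ma + 1) 1).foldl (fun ans i =>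
      let k := PySem.Int.floordiv i t
      let i2 := PySem.Int.mod (PySem.Int.mod i t + t) t
      let r := refs.getD i2.toNat 0
      let v := vec.getD i2.toNat 0
      let q := quos.getD i2.toNat []
      ans.set (i - mi).toNat
        (if r + k - v < 0 then 0
         else if (q.length : Int) ≤ r + k - v then 1
         else q.getD (r + k - v).toNat 0))
    (List.replicate (ma - mi + 1).toNat (-1))
  trimSeq ans

-- ===== PORT B =====
def from_decomp_alt (seq : List Int) (quos : List (List Int)) : List Int :=
  let t := quos.length
  let vec := coreToVec seq t
  let refs := quos.map refIdx
  match PySem.List.min? ((PySem.List.pyRange 0 t 1).map (fun i =>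
          (vec.getD i.toNat 0 - refs.getD i.toNat 0) * t + i)) (fun x => x),
        PySem.List.max? ((PySem.List.pyRange 0 t 1).map (fun i =>
          (((quos.getD i.toNat []).length : Int) - refs.getD i.toNat 0 + vec.getD i.toNat 0) * t + i)) (fun x => x) with
  | some mi, some ma =>
    let k0 := PySem.Int.floordiv mi t
    let k1 := PySem.Int.floordiv ma t
    let cols := (PySem.List.pyRange 0 t 1).map (fun i =>
      List.replicate (vec.getD i.toNat 0 - refs.getD i.toNat 0 - k0).toNat (0 : Int)
        ++ quos.getD i.toNat []
        ++ List.replicate (k1 - (vec.getD i.toNat 0 - refs.getD i.toNat 0 + ((quos.getD i.toNat []).length : Int)) + 1).toNat (1 : Int))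
    let ans := (PySem.List.pyRange mi (ma + 1) 1).map (fun i =>
      (cols.getD (PySem.Int.mod i t).toNat []).getD (PySem.Int.floordiv i t - k0).toNat 0)
    trimSeq ans
  | _, _ => []  -- t = 0: Python raises here (outside Pre_)

-- ===== PRECONDITION & SPEC =====
-- Pre_ excludes only quos = [], on which the Python A raises IndexError (and B raises ValueError).
def Pre_from_decomp (seq : List Int) (quos : List (List Int)) : Prop := quos ≠ []
instance (seq : List Int) (quos : List (List Int)) : Decidable (Pre_from_decomp seq quos) := by unfold Pre_from_decomp; infer_instance

def pvWitness_from_decomp : List Int × List (List Int) := ([1, 0, 1, 1, 0], [[1, 0], [0, 1]])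

def Spec_from_decomp (seq : List Int) (quos : List (List Int)) (out : List Int) : Prop := out = from_decomp_alt seq quos
instance (seq : List Int) (quos : List (List Int)) (out : List Int) : Decidable (Spec_from_decomp seq quos out) := by unfold Spec_from_decomp; infer_instance

-- ===== CLAIM (what is proved, stated in full; the proofs are below) =====
def Claim_equal_from_decomp : Prop := ∀ (seq : List Int) (quos : List (List Int)), Dom_from_decomp seq quos → Pre_from_decomp seq quos → Spec_from_decomp seq quos (from_decomp seq quos)

-- ===== LEMMAS AND PROOFS =====

theorem set_append_len (pre : List Int) (v : Int) (suf : List Int) (x : Int) :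
    (pre ++ v :: suf).set pre.length x = pre ++ x :: suf := by
  induction pre with
  | nil => rfl
  | cons h t ih => simp [ih]

theorem foldl_pair_minmax (f g : Int → Int) (l : List Int) (m0 M0 : Int) :
    l.foldl (fun (p : Int × Int) i =>
        (if f i < p.1 then f i else p.1, if p.2 < g i then g i else p.2)) (m0, M0)
    = (l.foldl (fun m i => min m (f i)) m0, l.foldl (fun M i => max M (g i)) M0) := by
  induction l generalizing m0 M0 with
  | nil => rfl
  | cons x xs ih =>
    simp only [List.foldl_cons]
    rw [show (if f x < m0 then f x else m0) = min m0 (f x) by split_ifs <;> omega,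
        show (if M0 < g x then g x else M0) = max M0 (g x) by split_ifs <;> omega]
    exact ih _ _

theorem min?_pyRange_map (t : Nat) (ht : 0 < t) (f : Int → Int) :
    PySem.List.min? ((PySem.List.pyRange 0 t 1).map f) (fun x => x)
    = some ((PySem.List.pyRange 1 t 1).foldl (fun m i => min m (f i)) (f 0)) := by
  rw [PySem.List.pyRange_one_cons (by exact_mod_cast ht)]
  simp only [List.map_cons]
  rw [PySem.List.min?_id_cons, List.foldl_map]
  norm_num

theorem max?_pyRange_map (t : Nat) (ht : 0 < t) (f : Int → Int) :
    PySem.List.max? ((PySem.List.pyRange 0 t 1).map f) (fun x => x)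
    = some ((PySem.List.pyRange 1 t 1).foldl (fun M i => max M (f i)) (f 0)) := by
  rw [PySem.List.pyRange_one_cons (by exact_mod_cast ht)]
  simp only [List.map_cons]
  rw [PySem.List.max?_id_cons, List.foldl_map]
  norm_num

theorem foldl_set_pyRange (f : Int → Int) (mi : Int) (k : Nat) :
    ∀ (a : Int) (pre init : List Int), mi ≤ a → pre.length = (a - mi).toNat →
      init.length = k →
      (PySem.List.pyRange a (a + (k : Int)) 1).foldl
          (fun ans i => ans.set (i - mi).toNat (f i)) (pre ++ init)
      = pre ++ (PySem.List.pyRange a (a + (k : Int)) 1).map f := by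
  induction k with
  | zero =>
    intro a pre init _ _ hinit
    have : init = [] := List.eq_nil_of_length_eq_zero hinit
    subst this
    simp [PySem.List.pyRange_one_eq_nil]
  | succ n ih =>
    intro a pre init hmi hpre hinit
    obtain ⟨v, init', rfl⟩ : ∃ v init', init = v :: init' := by
      cases init with
      | nil => simp at hinit
      | cons v w => exact ⟨v, w, rfl⟩
    rw [PySem.List.pyRange_one_cons (by omega : a < a + ((n + 1 : Nat) : Int))]
    simp only [List.foldl_cons, List.map_cons]
    have hset : (pre ++ v :: init').set (a - mi).toNat (f a) = (pre ++ [f a]) ++ init' := by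
      have h1 : (a - mi).toNat = pre.length := by omega
      rw [h1, set_append_len]
      simp
    rw [hset]
    have hb : a + ((n + 1 : Nat) : Int) = (a + 1) + ((n : Nat) : Int) := by push_cast; ring
    rw [hb]
    rw [ih (a + 1) (pre ++ [f a]) init' (by omega)
          (by simp [hpre]; omega) (by simpa using hinit)]
    simp


theorem getD_map_pyRange_zero {α : Type} (f : Int → α) (t n : Nat) (hn : n < t) (d : α) :
    ((PySem.List.pyRange 0 (t : Int) 1).map f).getD n d = f (n : Int) := by
  rw [PySem.List.pyRange_one, List.map_map, List.getD_eq_getElem?_getD, List.getElem?_map,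
      List.getElem?_range (by simp; omega)]
  simp

theorem col_lookup (q : List Int) (lo k0 k1 k : Int)
    (h0 : k0 ≤ lo) (h1 : lo + (q.length : Int) ≤ k1) (hk0 : k0 ≤ k) (hk1 : k ≤ k1) :
    (List.replicate (lo - k0).toNat (0 : Int) ++ q
      ++ List.replicate (k1 - (lo + (q.length : Int)) + 1).toNat (1 : Int)).getD (k - k0).toNat 0
    = (if k - lo < 0 then 0
       else if (q.length : Int) ≤ k - lo then 1
       else q.getD (k - lo).toNat 0) := by
  rw [List.getD_eq_getElem?_getD]
  by_cases hc1 : k - lo < 0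
  · rw [if_pos hc1, List.getElem?_append_left (by simp; omega),
        List.getElem?_append_left (by simp; omega), List.getElem?_replicate]
    rw [if_pos (by omega)]
    rfl
  · rw [if_neg hc1]
    by_cases hc2 : (q.length : Int) ≤ k - lo
    · rw [if_pos hc2, List.getElem?_append_right (by simp; omega), List.getElem?_replicate]
      rw [if_pos (by simp; omega)]
      rfl
    · rw [if_neg hc2, List.getElem?_append_left (by simp; omega),
          List.getElem?_append_right (by simp; omega), List.getD_eq_getElem?_getD]
      have hidx : (k - k0).toNat - (List.replicate (lo - k0).toNat (0 : Int)).length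
          = (k - lo).toNat := by simp; omega
      rw [hidx]

-- the filled answer list of A equals the gathered answer list of B
theorem core_eq (quos : List (List Int)) (vec refs : List Int) (t : Nat) (mi ma : Int)
    (ht : 0 < t)
    (hmi : ∀ i2 : Int, 0 ≤ i2 → i2 < (t : Int) →
      mi ≤ (vec.getD i2.toNat 0 - refs.getD i2.toNat 0) * (t : Int) + i2)
    (hma : ∀ i2 : Int, 0 ≤ i2 → i2 < (t : Int) →
      (((quos.getD i2.toNat []).length : Int) - refs.getD i2.toNat 0 + vec.getD i2.toNat 0) * (t : Int) + i2 ≤ ma)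
    (hmm : mi ≤ ma) :
    (PySem.List.pyRange mi (ma + 1) 1).foldl (fun ans i =>
        ans.set (i - mi).toNat
          (if refs.getD (PySem.Int.mod (PySem.Int.mod i (t : Int) + (t : Int)) (t : Int)).toNat 0
                + PySem.Int.floordiv i (t : Int)
                - vec.getD (PySem.Int.mod (PySem.Int.mod i (t : Int) + (t : Int)) (t : Int)).toNat 0 < 0 then 0
           else if ((quos.getD (PySem.Int.mod (PySem.Int.mod i (t : Int) + (t : Int)) (t : Int)).toNat []).length : Int)
                ≤ refs.getD (PySem.Int.mod (PySem.Int.mod i (t : Int) + (t : Int)) (t : Int)).toNat 0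
                  + PySem.Int.floordiv i (t : Int)
                  - vec.getD (PySem.Int.mod (PySem.Int.mod i (t : Int) + (t : Int)) (t : Int)).toNat 0 then 1
           else (quos.getD (PySem.Int.mod (PySem.Int.mod i (t : Int) + (t : Int)) (t : Int)).toNat []).getD
                (refs.getD (PySem.Int.mod (PySem.Int.mod i (t : Int) + (t : Int)) (t : Int)).toNat 0
                  + PySem.Int.floordiv i (t : Int)
                  - vec.getD (PySem.Int.mod (PySem.Int.mod i (t : Int) + (t : Int)) (t : Int)).toNat 0).toNat 0))
      (List.replicate (ma - mi + 1).toNat (-1))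
    = (PySem.List.pyRange mi (ma + 1) 1).map (fun i =>
        (((PySem.List.pyRange 0 (t : Int) 1).map (fun i =>
            List.replicate (vec.getD i.toNat 0 - refs.getD i.toNat 0 - PySem.Int.floordiv mi (t : Int)).toNat (0 : Int)
              ++ quos.getD i.toNat []
              ++ List.replicate (PySem.Int.floordiv ma (t : Int)
                    - (vec.getD i.toNat 0 - refs.getD i.toNat 0 + ((quos.getD i.toNat []).length : Int)) + 1).toNat (1 : Int))).getD
          (PySem.Int.mod i (t : Int)).toNat []).getD
          (PySem.Int.floordiv i (t : Int) - PySem.Int.floordiv mi (t : Int)).toNat 0) := by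
  have ht' : (0 : Int) < (t : Int) := by exact_mod_cast ht
  rw [show ma + 1 = mi + (((ma - mi + 1).toNat : Nat) : Int) by omega]
  have hfill := foldl_set_pyRange (fun i =>
      (if refs.getD (PySem.Int.mod (PySem.Int.mod i (t : Int) + (t : Int)) (t : Int)).toNat 0
            + PySem.Int.floordiv i (t : Int)
            - vec.getD (PySem.Int.mod (PySem.Int.mod i (t : Int) + (t : Int)) (t : Int)).toNat 0 < 0 then 0
       else if ((quos.getD (PySem.Int.mod (PySem.Int.mod i (t : Int) + (t : Int)) (t : Int)).toNat []).length : Int)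
            ≤ refs.getD (PySem.Int.mod (PySem.Int.mod i (t : Int) + (t : Int)) (t : Int)).toNat 0
              + PySem.Int.floordiv i (t : Int)
              - vec.getD (PySem.Int.mod (PySem.Int.mod i (t : Int) + (t : Int)) (t : Int)).toNat 0 then 1
       else (quos.getD (PySem.Int.mod (PySem.Int.mod i (t : Int) + (t : Int)) (t : Int)).toNat []).getD
            (refs.getD (PySem.Int.mod (PySem.Int.mod i (t : Int) + (t : Int)) (t : Int)).toNat 0
              + PySem.Int.floordiv i (t : Int)
              - vec.getD (PySem.Int.mod (PySem.Int.mod i (t : Int) + (t : Int)) (t : Int)).toNat 0).toNat 0))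
      mi ((ma - mi + 1).toNat) mi [] (List.replicate ((ma - mi + 1).toNat) (-1))
      le_rfl (by simp) (by simp)
  rw [List.nil_append] at hfill
  rw [hfill]
  refine List.map_congr_left fun i hi => ?_
  rw [PySem.List.mem_pyRange_one] at hi
  obtain ⟨hil, hir⟩ := hi
  have hima : i ≤ ma := by omega
  simp only [PySem.Int.floordiv_eq_ediv_of_pos ht', PySem.Int.mod_eq_emod_of_pos ht']
  have hmod : (i % (t : Int) + (t : Int)) % (t : Int) = i % (t : Int) := by
    rw [Int.add_emod_right, Int.emod_emod_of_dvd _ dvd_rfl]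
  rw [hmod]
  have hi2a : 0 ≤ i % (t : Int) := Int.emod_nonneg _ (by omega)
  have hi2b : i % (t : Int) < (t : Int) := Int.emod_lt_of_pos _ ht'
  have hcol : ((PySem.List.pyRange 0 (t : Int) 1).map (fun j =>
      List.replicate (vec.getD j.toNat 0 - refs.getD j.toNat 0 - mi / (t : Int)).toNat (0 : Int)
        ++ quos.getD j.toNat []
        ++ List.replicate (ma / (t : Int)
              - (vec.getD j.toNat 0 - refs.getD j.toNat 0 + ((quos.getD j.toNat []).length : Int)) + 1).toNat (1 : Int))).getD
      (i % (t : Int)).toNat []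
      = List.replicate (vec.getD (i % (t : Int)).toNat 0 - refs.getD (i % (t : Int)).toNat 0 - mi / (t : Int)).toNat (0 : Int)
        ++ quos.getD (i % (t : Int)).toNat []
        ++ List.replicate (ma / (t : Int)
              - (vec.getD (i % (t : Int)).toNat 0 - refs.getD (i % (t : Int)).toNat 0 + ((quos.getD (i % (t : Int)).toNat []).length : Int)) + 1).toNat (1 : Int) := by
    rw [getD_map_pyRange_zero _ t (i % (t : Int)).toNat (by omega) []]
    rw [show (((i % (t : Int)).toNat : Nat) : Int) = i % (t : Int) by omega]
  rw [hcol]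
  have hF := hmi (i % (t : Int)) hi2a hi2b
  have hG := hma (i % (t : Int)) hi2a hi2b
  have hdiv : ∀ c : Int, ((c * (t : Int) + i % (t : Int)) / (t : Int)) = c := by
    intro c
    rw [add_comm, Int.add_mul_ediv_right _ _ (by omega : (t : Int) ≠ 0),
        Int.ediv_eq_zero_of_lt hi2a hi2b, zero_add]
  have hk0 : mi / (t : Int) ≤ vec.getD (i % (t : Int)).toNat 0 - refs.getD (i % (t : Int)).toNat 0 := by
    have := Int.ediv_le_ediv ht' hF
    rwa [hdiv] at this
  have hk1 : (vec.getD (i % (t : Int)).toNat 0 - refs.getD (i % (t : Int)).toNat 0)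
      + ((quos.getD (i % (t : Int)).toNat []).length : Int) ≤ ma / (t : Int) := by
    have h2 : (((quos.getD (i % (t : Int)).toNat []).length : Int) - refs.getD (i % (t : Int)).toNat 0
        + vec.getD (i % (t : Int)).toNat 0) * (t : Int) + i % (t : Int)
        = ((vec.getD (i % (t : Int)).toNat 0 - refs.getD (i % (t : Int)).toNat 0)
            + ((quos.getD (i % (t : Int)).toNat []).length : Int)) * (t : Int) + i % (t : Int) := by ring
    rw [h2] at hG
    have := Int.ediv_le_ediv ht' hG
    rwa [hdiv] at this
  have hkk0 : mi / (t : Int) ≤ i / (t : Int) := Int.ediv_le_ediv ht' hil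
  have hkk1 : i / (t : Int) ≤ ma / (t : Int) := Int.ediv_le_ediv ht' hima
  rw [col_lookup (quos.getD (i % (t : Int)).toNat [])
        (vec.getD (i % (t : Int)).toNat 0 - refs.getD (i % (t : Int)).toNat 0)
        (mi / (t : Int)) (ma / (t : Int)) (i / (t : Int)) hk0 hk1 hkk0 hkk1]
  rw [show i / (t : Int) - (vec.getD (i % (t : Int)).toNat 0 - refs.getD (i % (t : Int)).toNat 0)
        = refs.getD (i % (t : Int)).toNat 0 + i / (t : Int) - vec.getD (i % (t : Int)).toNat 0 by ring]

-- ===== VERDICT (by name: the statement is the Claim_ definition above) =====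
theorem from_decomp_spec : Claim_equal_from_decomp := by
  intro seq quos _ hpre
  unfold Spec_from_decomp
  have ht : 0 < quos.length := List.length_pos_of_ne_nil hpre
  have htI : (0 : Int) < (quos.length : Int) := by exact_mod_cast ht
  have hmi0 := min?_pyRange_map quos.length ht (fun i =>
      ((coreToVec seq quos.length).getD i.toNat 0 - (quos.map refIdx).getD i.toNat 0) * (quos.length : Int) + i)
  have hma0 := max?_pyRange_map quos.length ht (fun i =>
      (((quos.getD i.toNat []).length : Int) - (quos.map refIdx).getD i.toNat 0
        + (coreToVec seq quos.length).getD i.toNat 0) * (quos.length : Int) + i)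
  have hminle := PySem.List.min?_isMin hmi0
  have hmaxle := PySem.List.max?_isMax hma0
  simp only [from_decomp, from_decomp_alt]
  rw [hmi0, hma0]
  dsimp only
  rw [foldl_pair_minmax (fun i =>
        ((coreToVec seq quos.length).getD i.toNat 0 - (quos.map refIdx).getD i.toNat 0) * (quos.length : Int) + i)
      (fun i =>
        (((quos.getD i.toNat []).length : Int) - (quos.map refIdx).getD i.toNat 0
          + (coreToVec seq quos.length).getD i.toNat 0) * (quos.length : Int) + i)]
  dsimp only
  simp only [Int.toNat_zero, add_zero]
  simp only [Int.toNat_zero, add_zero] at hminle hmaxle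
  rw [show ((coreToVec seq quos.length).getD 0 0 + ((quos.getD 0 []).length : Int)
        - (quos.map refIdx).getD 0 0) * (quos.length : Int)
      = (((quos.getD 0 []).length : Int) - (quos.map refIdx).getD 0 0
        + (coreToVec seq quos.length).getD 0 0) * (quos.length : Int) by ring]
  have hF0 := hminle _ (List.mem_map_of_mem
      (PySem.List.mem_pyRange_one.mpr ⟨le_rfl, htI⟩))
  have hG0 := hmaxle _ (List.mem_map_of_mem
      (PySem.List.mem_pyRange_one.mpr ⟨le_rfl, htI⟩))
  simp only [Int.toNat_zero, add_zero] at hF0 hG0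
  have hFG : ((coreToVec seq quos.length).getD 0 0
        - (quos.map refIdx).getD 0 0) * (quos.length : Int)
      ≤ (((quos.getD 0 []).length : Int) - (quos.map refIdx).getD 0 0
        + (coreToVec seq quos.length).getD 0 0) * (quos.length : Int) := by
    have hq : (0 : Int) ≤ ((quos.getD 0 []).length : Int) := by positivity
    have ht0 : (0 : Int) ≤ (quos.length : Int) := by positivity
    nlinarith
  congr 1
  exact core_eq quos _ _ quos.length _ _ ht
    (fun i2 h1 h2 => hminle _ (List.mem_map_of_mem (PySem.List.mem_pyRange_one.mpr ⟨h1, h2⟩)))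
    (fun i2 h1 h2 => hmaxle _ (List.mem_map_of_mem (PySem.List.mem_pyRange_one.mpr ⟨h1, h2⟩)))
    (le_trans hF0 (le_trans hFG hG0))
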